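-- pv_equiv track=rewrite | github.com/Husky34Dev/mcp_final_boss | app/utils/formatter.py | format_incidencias
-- ===== SOURCE A (Python) =====
-- def format_incidencias(data: dict) -> str:
--     incidencias = data.get("incidencias", [])
--     if not incidencias:
--         return "### Incidencias\nNo se encontraron incidencias."
--
--     # Contadores de estado
--     estados = {"Abierto": 0, "En Proceso": 0, "Resuelto": 0}
--     for inc in incidencias:
--         estado = inc.get('estado', 'Desconocido')
--         if estado in estados:
--             estados[estado] += 1
--
--     # Resumen
--     resumen = (
--         "### Incidencias\n"
--         f"**Resumen:**\n"
--         f"- Total: {len(incidencias)} incidencia(s)\n"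
--         f"- Abiertas: {estados['Abierto']}\n"
--         f"- En proceso: {estados['En Proceso']}\n"
--         f"- Resueltas: {estados['Resuelto']}\n\n"
--         "#### Detalles\n"
--         "| Ubicación | Descripción | Estado |\n"
--         "|:----------|:------------|:-------|\n"
--     )
--
--     # Ordenar incidencias: primero abiertas, luego en proceso, finalmente resueltas
--     orden_estados = {"Abierto": 0, "En Proceso": 1, "Resuelto": 2}
--     incidencias_ordenadas = sorted(
--         incidencias,
--         key=lambda x: orden_estados.get(x.get('estado', 'Desconocido'), 99)
--     )
--
--     for inc in incidencias_ordenadas: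
--         tabla = f"| {inc.get('ubicacion', '-')} | {inc.get('descripcion', '-')} | {inc.get('estado', '-')} |\n"
--         resumen += tabla
--
--     return resumen
-- ===== SOURCE B (Python) =====
-- def format_incidencias(data: dict) -> str:
--     incidencias = data.get("incidencias", [])
--     if not incidencias:
--         return "### Incidencias\nNo se encontraron incidencias."
--
--     # One pass: distribute incidents into four ordered buckets instead of sorting.
--     abiertos, en_proceso, resueltos, otros = [], [], [], []
--     for inc in incidencias:
--         estado = inc.get('estado', 'Desconocido')
--         if estado == "Abierto":
--             abiertos.append(inc)
--         elif estado == "En Proceso":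
--             en_proceso.append(inc)
--         elif estado == "Resuelto":
--             resueltos.append(inc)
--         else:
--             otros.append(inc)
--
--     header = (
--         "### Incidencias\n"
--         "**Resumen:**\n"
--         f"- Total: {len(incidencias)} incidencia(s)\n"
--         f"- Abiertas: {len(abiertos)}\n"
--         f"- En proceso: {len(en_proceso)}\n"
--         f"- Resueltas: {len(resueltos)}\n\n"
--         "#### Detalles\n"
--         "| Ubicación | Descripción | Estado |\n"
--         "|:----------|:------------|:-------|\n"
--     )
--
--     rows = "".join(
--         f"| {inc.get('ubicacion', '-')} | {inc.get('descripcion', '-')} | {inc.get('estado', '-')} |\n"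
--         for inc in abiertos + en_proceso + resueltos + otros
--     )
--     return header + rows
-- ===== Notes on version B (the rewrite author's own statement) =====
-- stated objective: alternative
-- what changed: B replaces A's comparison sort (sorted with a rank key) by a single O(n) bucket-distribution pass into four ordered lists (abiertos, en_proceso, resueltos, otros), reads the summary counters as the bucket lengths instead of a dict-counting loop, and emits the detail rows by joining the buckets in fixed order, producing byte-identical output.
import Mathlib
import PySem

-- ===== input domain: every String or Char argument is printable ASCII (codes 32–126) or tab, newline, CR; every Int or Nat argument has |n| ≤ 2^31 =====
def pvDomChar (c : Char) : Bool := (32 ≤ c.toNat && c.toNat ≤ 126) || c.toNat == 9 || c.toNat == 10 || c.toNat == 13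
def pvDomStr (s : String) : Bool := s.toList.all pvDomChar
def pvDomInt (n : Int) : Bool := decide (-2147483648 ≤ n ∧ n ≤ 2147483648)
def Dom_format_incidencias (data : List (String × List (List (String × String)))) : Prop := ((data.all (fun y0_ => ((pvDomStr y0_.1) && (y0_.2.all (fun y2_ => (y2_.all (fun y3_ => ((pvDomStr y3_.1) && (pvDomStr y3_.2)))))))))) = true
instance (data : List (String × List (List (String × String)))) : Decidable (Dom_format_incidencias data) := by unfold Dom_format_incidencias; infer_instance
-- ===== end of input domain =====

-- B replaces A's comparison sort by a single bucket-distribution pass (four ordered lists) and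
-- joins precomputed rows; objective: alternative decomposition, byte-identical output.

-- ===== PORT A =====
-- the row f-string of A's final loop
def rowA (inc : List (String × String)) : String :=
  "| " ++ (PySem.Dict.mk inc).getD "ubicacion" "-" ++ " | " ++
    (PySem.Dict.mk inc).getD "descripcion" "-" ++ " | " ++
    (PySem.Dict.mk inc).getD "estado" "-" ++ " |\n"

def format_incidencias (data : List (String × List (List (String × String)))) : String :=
  let incidencias := (PySem.Dict.mk data).getD "incidencias" []
  if incidencias = [] then "### Incidencias\nNo se encontraron incidencias."
  else
    let estados := incidencias.foldl (fun (d : PySem.Dict String Int) inc =>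
        let estado := (PySem.Dict.mk inc).getD "estado" "Desconocido"
        if d.contains estado then d.modify estado 0 (· + 1) else d)
      (PySem.Dict.mk [("Abierto", 0), ("En Proceso", 0), ("Resuelto", 0)])
    -- estados['Abierto'] etc.: the keys are always present, so getD is exact here
    let resumen :=
      "### Incidencias\n**Resumen:**\n- Total: " ++ PySem.Int.toStr (PySem.List.len incidencias) ++
      " incidencia(s)\n- Abiertas: " ++ PySem.Int.toStr (estados.getD "Abierto" 0) ++
      "\n- En proceso: " ++ PySem.Int.toStr (estados.getD "En Proceso" 0) ++
      "\n- Resueltas: " ++ PySem.Int.toStr (estados.getD "Resuelto" 0) ++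
      "\n\n#### Detalles\n| Ubicación | Descripción | Estado |\n|:----------|:------------|:-------|\n"
    let orden := PySem.Dict.mk [("Abierto", (0 : Int)), ("En Proceso", 1), ("Resuelto", 2)]
    let ordenadas := PySem.List.sorted incidencias
      (fun x => orden.getD ((PySem.Dict.mk x).getD "estado" "Desconocido") 99) false
    ordenadas.foldl (fun resumen inc => resumen ++ rowA inc) resumen

-- ===== PORT B =====
def estadoDe (inc : List (String × String)) : String :=
  (PySem.Dict.mk inc).getD "estado" "Desconocido"

-- the row f-string of B's generator expression
def rowB (inc : List (String × String)) : String :=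
  "| " ++ (PySem.Dict.mk inc).getD "ubicacion" "-" ++ " | " ++
    (PySem.Dict.mk inc).getD "descripcion" "-" ++ " | " ++
    (PySem.Dict.mk inc).getD "estado" "-" ++ " |\n"

def format_incidencias_alt (data : List (String × List (List (String × String)))) : String :=
  let incidencias := (PySem.Dict.mk data).getD "incidencias" []
  if incidencias = [] then "### Incidencias\nNo se encontraron incidencias."
  else
    let b := incidencias.foldl
      (fun (b : List (List (String × String)) × List (List (String × String)) ×
                 List (List (String × String)) × List (List (String × String))) inc =>
        let e := estadoDe inc
        if e = "Abierto" then (b.1 ++ [inc], b.2.1, b.2.2.1, b.2.2.2)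
        else if e = "En Proceso" then (b.1, b.2.1 ++ [inc], b.2.2.1, b.2.2.2)
        else if e = "Resuelto" then (b.1, b.2.1, b.2.2.1 ++ [inc], b.2.2.2)
        else (b.1, b.2.1, b.2.2.1, b.2.2.2 ++ [inc]))
      ([], [], [], [])
    let header :=
      "### Incidencias\n**Resumen:**\n- Total: " ++ PySem.Int.toStr (PySem.List.len incidencias) ++
      " incidencia(s)\n- Abiertas: " ++ PySem.Int.toStr (PySem.List.len b.1) ++
      "\n- En proceso: " ++ PySem.Int.toStr (PySem.List.len b.2.1) ++
      "\n- Resueltas: " ++ PySem.Int.toStr (PySem.List.len b.2.2.1) ++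
      "\n\n#### Detalles\n| Ubicación | Descripción | Estado |\n|:----------|:------------|:-------|\n"
    header ++ PySem.Str.join "" ((b.1 ++ b.2.1 ++ b.2.2.1 ++ b.2.2.2).map rowB)

-- ===== PRECONDITION & SPEC =====
def Spec_format_incidencias (data : List (String × List (List (String × String)))) (out : String) : Prop := out = format_incidencias_alt data
instance (data : List (String × List (List (String × String)))) (out : String) : Decidable (Spec_format_incidencias data out) := by unfold Spec_format_incidencias; infer_instance

-- ===== CLAIM (what is proved, stated in full; the proofs are below) =====
def Claim_equal_format_incidencias : Prop := ∀ (data : List (String × List (List (String × String)))), Dom_format_incidencias data → Spec_format_incidencias data (format_incidencias data)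

-- ===== LEMMAS AND PROOFS =====

-- A's loop body over the counter dict, named for the proofs
def stepA (d : PySem.Dict String Int) (inc : List (String × String)) : PySem.Dict String Int :=
  let estado := (PySem.Dict.mk inc).getD "estado" "Desconocido"
  if d.contains estado then d.modify estado 0 (· + 1) else d

def headerStr (total abiertas enProceso resueltas : Int) : String :=
  "### Incidencias\n**Resumen:**\n- Total: " ++ PySem.Int.toStr total ++
  " incidencia(s)\n- Abiertas: " ++ PySem.Int.toStr abiertas ++
  "\n- En proceso: " ++ PySem.Int.toStr enProceso ++
  "\n- Resueltas: " ++ PySem.Int.toStr resueltas ++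
  "\n\n#### Detalles\n| Ubicación | Descripción | Estado |\n|:----------|:------------|:-------|\n"

def keyAOf (x : List (String × String)) : Int :=
  (PySem.Dict.mk [("Abierto", (0 : Int)), ("En Proceso", 1), ("Resuelto", 2)]).getD (estadoDe x) 99

def stepB (b : List (List (String × String)) × List (List (String × String)) ×
               List (List (String × String)) × List (List (String × String)))
    (inc : List (String × String)) :
    List (List (String × String)) × List (List (String × String)) ×
      List (List (String × String)) × List (List (String × String)) :=
  let e := estadoDe inc
  if e = "Abierto" then (b.1 ++ [inc], b.2.1, b.2.2.1, b.2.2.2)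
  else if e = "En Proceso" then (b.1, b.2.1 ++ [inc], b.2.2.1, b.2.2.2)
  else if e = "Resuelto" then (b.1, b.2.1, b.2.2.1 ++ [inc], b.2.2.2)
  else (b.1, b.2.1, b.2.2.1, b.2.2.2 ++ [inc])

def bodyA (xs : List (List (String × String))) : String :=
  if xs = [] then "### Incidencias\nNo se encontraron incidencias."
  else
    let estados := xs.foldl stepA
      (PySem.Dict.mk [("Abierto", 0), ("En Proceso", 0), ("Resuelto", 0)])
    (PySem.List.sorted xs keyAOf false).foldl (fun resumen inc => resumen ++ rowA inc)
      (headerStr (PySem.List.len xs) (estados.getD "Abierto" 0)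
        (estados.getD "En Proceso" 0) (estados.getD "Resuelto" 0))

def bodyB (xs : List (List (String × String))) : String :=
  if xs = [] then "### Incidencias\nNo se encontraron incidencias."
  else
    let b := xs.foldl stepB ([], [], [], [])
    headerStr (PySem.List.len xs) (PySem.List.len b.1) (PySem.List.len b.2.1)
      (PySem.List.len b.2.2.1) ++
      PySem.Str.join "" ((b.1 ++ b.2.1 ++ b.2.2.1 ++ b.2.2.2).map rowB)

lemma keyA_char (x : List (String × String)) :
    (PySem.Dict.mk [("Abierto", (0 : Int)), ("En Proceso", 1), ("Resuelto", 2)]).getD (estadoDe x) 99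
    = (if estadoDe x = "Abierto" then 0 else if estadoDe x = "En Proceso" then 1
       else if estadoDe x = "Resuelto" then 2 else 99) := by
  by_cases h1 : estadoDe x = "Abierto"
  · simp only [h1]; decide
  · by_cases h2 : estadoDe x = "En Proceso"
    · simp only [h2]; decide
    · by_cases h3 : estadoDe x = "Resuelto"
      · simp only [h3]; decide
      · have b1 : ("Abierto" == estadoDe x) = false := beq_eq_false_iff_ne.mpr (Ne.symm h1)
        have b2 : ("En Proceso" == estadoDe x) = false := beq_eq_false_iff_ne.mpr (Ne.symm h2)
        have b3 : ("Resuelto" == estadoDe x) = false := beq_eq_false_iff_ne.mpr (Ne.symm h3)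
        simp [PySem.Dict.getD, PySem.Dict.get?, List.find?, b1, b2, b3, h1, h2, h3]

lemma counts_eq (xs : List (List (String × String))) (a p r : Int) :
    xs.foldl stepA (PySem.Dict.mk [("Abierto", a), ("En Proceso", p), ("Resuelto", r)])
    = PySem.Dict.mk
        [("Abierto", a + (xs.countP (fun x => decide (estadoDe x = "Abierto")) : Int)),
         ("En Proceso", p + (xs.countP (fun x => decide (estadoDe x = "En Proceso")) : Int)),
         ("Resuelto", r + (xs.countP (fun x => decide (estadoDe x = "Resuelto")) : Int))] := by
  induction xs generalizing a p r with
  | nil => simp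
  | cons x t ih =>
      have hAb : estadoDe x = "Abierto" → stepA (PySem.Dict.mk [("Abierto", a), ("En Proceso", p), ("Resuelto", r)]) x
          = PySem.Dict.mk [("Abierto", a + 1), ("En Proceso", p), ("Resuelto", r)] := by
        intro h; simp only [stepA]
        rw [show (PySem.Dict.mk x).getD "estado" "Desconocido" = estadoDe x from rfl, h]
        simp [PySem.Dict.contains, PySem.Dict.modify, PySem.Dict.insert, PySem.Dict.getD, PySem.Dict.get?]
      have hEP : estadoDe x = "En Proceso" → stepA (PySem.Dict.mk [("Abierto", a), ("En Proceso", p), ("Resuelto", r)]) x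
          = PySem.Dict.mk [("Abierto", a), ("En Proceso", p + 1), ("Resuelto", r)] := by
        intro h; simp only [stepA]
        rw [show (PySem.Dict.mk x).getD "estado" "Desconocido" = estadoDe x from rfl, h]
        simp [PySem.Dict.contains, PySem.Dict.modify, PySem.Dict.insert, PySem.Dict.getD, PySem.Dict.get?]
      have hRe : estadoDe x = "Resuelto" → stepA (PySem.Dict.mk [("Abierto", a), ("En Proceso", p), ("Resuelto", r)]) x
          = PySem.Dict.mk [("Abierto", a), ("En Proceso", p), ("Resuelto", r + 1)] := by
        intro h; simp only [stepA]
        rw [show (PySem.Dict.mk x).getD "estado" "Desconocido" = estadoDe x from rfl, h]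
        simp [PySem.Dict.contains, PySem.Dict.modify, PySem.Dict.insert, PySem.Dict.getD, PySem.Dict.get?]
      have hOt : estadoDe x ≠ "Abierto" → estadoDe x ≠ "En Proceso" → estadoDe x ≠ "Resuelto" →
          stepA (PySem.Dict.mk [("Abierto", a), ("En Proceso", p), ("Resuelto", r)]) x
          = PySem.Dict.mk [("Abierto", a), ("En Proceso", p), ("Resuelto", r)] := by
        intro h1 h2 h3; simp only [stepA]
        rw [show (PySem.Dict.mk x).getD "estado" "Desconocido" = estadoDe x from rfl]
        have : (PySem.Dict.mk [("Abierto", a), ("En Proceso", p), ("Resuelto", r)]).contains (estadoDe x) = false := by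
          simp [PySem.Dict.contains]
          exact ⟨by simpa [eq_comm] using h1, by simpa [eq_comm] using h2, by simpa [eq_comm] using h3⟩
        simp [this]
      simp only [List.foldl_cons, List.countP_cons]
      by_cases h1 : estadoDe x = "Abierto"
      · rw [hAb h1, ih]; simp [h1]; omega
      · by_cases h2 : estadoDe x = "En Proceso"
        · rw [hEP h2, ih]; simp [h2]; omega
        · by_cases h3 : estadoDe x = "Resuelto"
          · rw [hRe h3, ih]; simp [h3]; omega
          · rw [hOt h1 h2 h3, ih]; simp [h1, h2, h3]

lemma insertBy_append {α : Type} (bf : α → α → Bool) (x : α) (L R : List α)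
    (hL : ∀ y ∈ L, bf x y = false) (hR : ∀ y ∈ R, bf x y = true) :
    PySem.List.insertBy bf x (L ++ R) = L ++ x :: R := by
  induction L with
  | nil =>
      cases R with
      | nil => rfl
      | cons r t => simp [PySem.List.insertBy, hR r (by simp)]
  | cons a L ih =>
      have h1 : bf x a = false := hL a (by simp)
      simpa [PySem.List.insertBy, h1] using ih (fun y hy => hL y (by simp [hy]))

lemma fold_insertBy_four {α : Type} (key : α → Int) (xs A P R O : List α)
    (hA : ∀ y ∈ A, key y = 0) (hP : ∀ y ∈ P, key y = 1) (hR : ∀ y ∈ R, key y = 2)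
    (hO : ∀ y ∈ O, key y = 99)
    (hxs : ∀ x ∈ xs, key x = 0 ∨ key x = 1 ∨ key x = 2 ∨ key x = 99) :
    xs.foldl (fun acc x => PySem.List.insertBy (fun a b => decide (key a < key b)) x acc)
      (A ++ (P ++ (R ++ O)))
    = (A ++ xs.filter (fun x => key x == 0)) ++ ((P ++ xs.filter (fun x => key x == 1)) ++
      ((R ++ xs.filter (fun x => key x == 2)) ++ (O ++ xs.filter (fun x => key x == 99)))) := by
  induction xs generalizing A P R O with
  | nil => simp
  | cons x t ih =>
      rcases hxs x (by simp) with hk | hk | hk | hk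
      · have hstep : PySem.List.insertBy (fun a b => decide (key a < key b)) x (A ++ (P ++ (R ++ O)))
            = (A ++ [x]) ++ (P ++ (R ++ O)) := by
          rw [insertBy_append _ x A (P ++ (R ++ O))
            (fun y hy => by simp [hk, hA y hy])
            (fun y hy => by
              rcases List.mem_append.mp hy with h | h
              · simp [hk, hP y h]
              · rcases List.mem_append.mp h with h' | h'
                · simp [hk, hR y h']
                · simp [hk, hO y h'])]
          simp
        rw [List.foldl_cons, hstep,
          ih (A ++ [x]) P R O
            (by intro y hy; rcases List.mem_append.mp hy with h | h
                · exact hA y h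
                · simp at h; subst h; exact hk)
            hP hR hO (fun y hy => hxs y (by simp [hy]))]
        simp [hk]
      · have hstep : PySem.List.insertBy (fun a b => decide (key a < key b)) x (A ++ (P ++ (R ++ O)))
            = A ++ ((P ++ [x]) ++ (R ++ O)) := by
          rw [show A ++ (P ++ (R ++ O)) = (A ++ P) ++ (R ++ O) by simp,
            insertBy_append _ x (A ++ P) (R ++ O)
            (fun y hy => by
              rcases List.mem_append.mp hy with h | h
              · simp [hk, hA y h]
              · simp [hk, hP y h])
            (fun y hy => by
              rcases List.mem_append.mp hy with h | h
              · simp [hk, hR y h]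
              · simp [hk, hO y h])]
          simp
        rw [List.foldl_cons, hstep,
          ih A (P ++ [x]) R O hA
            (by intro y hy; rcases List.mem_append.mp hy with h | h
                · exact hP y h
                · simp at h; subst h; exact hk)
            hR hO (fun y hy => hxs y (by simp [hy]))]
        simp [hk]
      · have hstep : PySem.List.insertBy (fun a b => decide (key a < key b)) x (A ++ (P ++ (R ++ O)))
            = A ++ (P ++ ((R ++ [x]) ++ O)) := by
          rw [show A ++ (P ++ (R ++ O)) = (A ++ (P ++ R)) ++ O by simp,
            insertBy_append _ x (A ++ (P ++ R)) O
            (fun y hy => by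
              rcases List.mem_append.mp hy with h | h
              · simp [hk, hA y h]
              · rcases List.mem_append.mp h with h' | h'
                · simp [hk, hP y h']
                · simp [hk, hR y h'])
            (fun y hy => by simp [hk, hO y hy])]
          simp
        rw [List.foldl_cons, hstep,
          ih A P (R ++ [x]) O hA hP
            (by intro y hy; rcases List.mem_append.mp hy with h | h
                · exact hR y h
                · simp at h; subst h; exact hk)
            hO (fun y hy => hxs y (by simp [hy]))]
        simp [hk]
      · have hstep : PySem.List.insertBy (fun a b => decide (key a < key b)) x (A ++ (P ++ (R ++ O)))
            = A ++ (P ++ (R ++ (O ++ [x]))) := by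
          rw [show A ++ (P ++ (R ++ O)) = (A ++ (P ++ (R ++ O))) ++ [] by simp,
            insertBy_append _ x (A ++ (P ++ (R ++ O))) []
            (fun y hy => by
              rcases List.mem_append.mp hy with h | h
              · simp [hk, hA y h]
              · rcases List.mem_append.mp h with h' | h'
                · simp [hk, hP y h']
                · rcases List.mem_append.mp h' with h'' | h''
                  · simp [hk, hR y h'']
                  · simp [hk, hO y h''])
            (fun y hy => by simp at hy)]
          simp
        rw [List.foldl_cons, hstep,
          ih A P R (O ++ [x]) hA hP hR
            (by intro y hy; rcases List.mem_append.mp hy with h | h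
                · exact hO y h
                · simp at h; subst h; exact hk)
            (fun y hy => hxs y (by simp [hy]))]
        simp [hk]


lemma intercalate_nil_flatten (parts : List (List Char)) :
    ([] : List Char).intercalate parts = parts.flatten := by
  induction parts with
  | nil => simp [List.intercalate]
  | cons a t ih => cases t <;> simp_all [List.intercalate, List.intersperse]

lemma join_nil_cons (a : String) (t : List String) :
    PySem.Str.join "" (a :: t) = a ++ PySem.Str.join "" t := by
  apply String.toList_inj.mp
  simp [PySem.Str.join, PySem.Chars.join, intercalate_nil_flatten]

lemma foldl_row (l : List (List (String × String))) (s : String) :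
    l.foldl (fun acc inc => acc ++ rowA inc) s = s ++ PySem.Str.join "" (l.map rowB) := by
  induction l generalizing s with
  | nil => apply String.toList_inj.mp; simp [PySem.Str.join, PySem.Chars.join, List.intercalate]
  | cons x t ih =>
      have hrow : rowA x = rowB x := rfl
      simp only [List.foldl_cons, List.map_cons, join_nil_cons, ih, hrow, String.append_assoc]

lemma sorted_eq_buckets {α : Type} (key : α → Int) (xs : List α)
    (hxs : ∀ x ∈ xs, key x = 0 ∨ key x = 1 ∨ key x = 2 ∨ key x = 99) :
    PySem.List.sorted xs key false
    = xs.filter (fun x => key x == 0) ++ (xs.filter (fun x => key x == 1) ++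
      (xs.filter (fun x => key x == 2) ++ xs.filter (fun x => key x == 99))) := by
  rw [PySem.List.sorted_eq_foldl_insertBy]
  have h := fold_insertBy_four key xs [] [] [] [] (by simp) (by simp) (by simp) (by simp) hxs
  simpa using h

-- B's bucket pass computes the four filters
lemma buckets_eq (xs : List (List (String × String)))
    (A P R O : List (List (String × String))) :
    xs.foldl stepB (A, P, R, O)
    = (A ++ xs.filter (fun x => decide (estadoDe x = "Abierto")),
       P ++ xs.filter (fun x => decide (estadoDe x ≠ "Abierto" ∧ estadoDe x = "En Proceso")),
       R ++ xs.filter (fun x => decide (estadoDe x ≠ "Abierto" ∧ estadoDe x ≠ "En Proceso" ∧ estadoDe x = "Resuelto")),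
       O ++ xs.filter (fun x => decide (estadoDe x ≠ "Abierto" ∧ estadoDe x ≠ "En Proceso" ∧ estadoDe x ≠ "Resuelto"))) := by
  induction xs generalizing A P R O with
  | nil => simp
  | cons x t ih =>
      by_cases h1 : estadoDe x = "Abierto" <;> by_cases h2 : estadoDe x = "En Proceso" <;>
        by_cases h3 : estadoDe x = "Resuelto" <;>
        simp_all [stepB]

lemma filter0_eq (xs : List (List (String × String))) :
    xs.filter (fun x => keyAOf x == 0) = xs.filter (fun x => decide (estadoDe x = "Abierto")) := by
  refine List.filter_congr fun x _ => ?_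
  rw [show keyAOf x = _ from keyA_char x]
  by_cases h1 : estadoDe x = "Abierto" <;> by_cases h2 : estadoDe x = "En Proceso" <;>
    by_cases h3 : estadoDe x = "Resuelto" <;> simp_all

lemma filter1_eq (xs : List (List (String × String))) :
    xs.filter (fun x => keyAOf x == 1)
    = xs.filter (fun x => decide (estadoDe x ≠ "Abierto" ∧ estadoDe x = "En Proceso")) := by
  refine List.filter_congr fun x _ => ?_
  rw [show keyAOf x = _ from keyA_char x]
  by_cases h1 : estadoDe x = "Abierto" <;> by_cases h2 : estadoDe x = "En Proceso" <;>
    by_cases h3 : estadoDe x = "Resuelto" <;> simp_all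

lemma filter2_eq (xs : List (List (String × String))) :
    xs.filter (fun x => keyAOf x == 2)
    = xs.filter (fun x => decide (estadoDe x ≠ "Abierto" ∧ estadoDe x ≠ "En Proceso" ∧ estadoDe x = "Resuelto")) := by
  refine List.filter_congr fun x _ => ?_
  rw [show keyAOf x = _ from keyA_char x]
  by_cases h1 : estadoDe x = "Abierto" <;> by_cases h2 : estadoDe x = "En Proceso" <;>
    by_cases h3 : estadoDe x = "Resuelto" <;> simp_all

lemma filter99_eq (xs : List (List (String × String))) :
    xs.filter (fun x => keyAOf x == 99)
    = xs.filter (fun x => decide (estadoDe x ≠ "Abierto" ∧ estadoDe x ≠ "En Proceso" ∧ estadoDe x ≠ "Resuelto")) := by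
  refine List.filter_congr fun x _ => ?_
  rw [show keyAOf x = _ from keyA_char x]
  by_cases h1 : estadoDe x = "Abierto" <;> by_cases h2 : estadoDe x = "En Proceso" <;>
    by_cases h3 : estadoDe x = "Resuelto" <;> simp_all

lemma getD3_Ab (a p r : Int) :
    (PySem.Dict.mk [("Abierto", a), ("En Proceso", p), ("Resuelto", r)]).getD "Abierto" 0 = a := by
  simp [PySem.Dict.getD, PySem.Dict.get?, List.find?]

lemma getD3_EP (a p r : Int) :
    (PySem.Dict.mk [("Abierto", a), ("En Proceso", p), ("Resuelto", r)]).getD "En Proceso" 0 = p := by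
  simp [PySem.Dict.getD, PySem.Dict.get?, List.find?]

lemma getD3_Re (a p r : Int) :
    (PySem.Dict.mk [("Abierto", a), ("En Proceso", p), ("Resuelto", r)]).getD "Resuelto" 0 = r := by
  simp [PySem.Dict.getD, PySem.Dict.get?, List.find?]

lemma len_filter (p : List (String × String) → Bool) (xs : List (List (String × String))) :
    PySem.List.len (xs.filter p) = ((xs.countP p : Nat) : Int) := by
  simp [PySem.List.len_eq, List.countP_eq_length_filter]

lemma cntEP_eq (xs : List (List (String × String))) :
    xs.countP (fun x => decide (estadoDe x ≠ "Abierto" ∧ estadoDe x = "En Proceso"))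
    = xs.countP (fun x => decide (estadoDe x = "En Proceso")) := by
  refine List.countP_congr fun x _ => ?_
  by_cases h1 : estadoDe x = "Abierto" <;> by_cases h2 : estadoDe x = "En Proceso" <;> simp_all

lemma cntRe_eq (xs : List (List (String × String))) :
    xs.countP (fun x => decide (estadoDe x ≠ "Abierto" ∧ estadoDe x ≠ "En Proceso" ∧ estadoDe x = "Resuelto"))
    = xs.countP (fun x => decide (estadoDe x = "Resuelto")) := by
  refine List.countP_congr fun x _ => ?_
  by_cases h1 : estadoDe x = "Abierto" <;> by_cases h2 : estadoDe x = "En Proceso" <;>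
    by_cases h3 : estadoDe x = "Resuelto" <;> simp_all

lemma bodyA_eq_bodyB (xs : List (List (String × String))) : bodyA xs = bodyB xs := by
  unfold bodyA bodyB
  by_cases hnil : xs = []
  · simp [hnil]
  · simp only [if_neg hnil]
    rw [foldl_row, counts_eq,
      sorted_eq_buckets keyAOf xs
        (fun x _ => by
          rw [show keyAOf x = _ from keyA_char x]
          split_ifs <;> simp),
      buckets_eq, filter0_eq, filter1_eq, filter2_eq, filter99_eq]
    simp only [List.nil_append, getD3_Ab, getD3_EP, getD3_Re, zero_add, len_filter,
      cntEP_eq, cntRe_eq, List.append_assoc]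

-- ===== VERDICT (by name: the statement is the Claim_ definition above) =====
theorem format_incidencias_spec : Claim_equal_format_incidencias := by
  intro data _
  show format_incidencias data = format_incidencias_alt data
  calc format_incidencias data
      = bodyA ((PySem.Dict.mk data).getD "incidencias" []) := rfl
    _ = bodyB ((PySem.Dict.mk data).getD "incidencias" []) := bodyA_eq_bodyB _
    _ = format_incidencias_alt data := rfl
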